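-- pv_equiv track=rewrite | github.com/zjxht62/learnAlgorithmInPython | DSA22/homework/week8/class/H3-2.py | dpWordEdit
-- ===== SOURCE A (Python) =====
-- def dpWordEdit(original, target, oplist):
--     score = 0
--     operations = []
--
--     # 请在此编写你的代码（可删除pass语句）
--     # 初始化二维表格m[(i,j)]，均为0,None
--     # 表示源单词前i个字符子串，变为目标单词前j个字符子串，的最小编辑距离
--     # 以及最后进行了那个操作得到的这个最小编辑距离
--     m = {(i, j): [0, None] for i in range(len(original) + 1) for j in range(len(target) + 1)}
--
--     # 让字符的序号从1开始
--     original, target = '-' + original, '-' + target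
--
--     # 设定首列m[i,0]，全delete
--     for i in range(1, len(original)):
--         m[i, 0] = [oplist['delete'] * i, 'delete ' + original[i]]
--
--     # 设定首行m[0,j]，全insert
--     for j in range(1, len(target)):
--         m[0, j] = [oplist['insert'] * j, 'insert ' + target[j]]
--
--     # 逐个填写二维表
--     for i in range(1, len(original)):
--         for j in range(1, len(target)):
--             ops = []  # 可能的操作和对应的分数
--             # copy操作，有条件
--             if original[i] == target[j]:
--                 ops.append([m[i - 1, j - 1][0] + oplist['copy'], 'copy ' + original[i]])
--             # delete操作
--             ops.append([m[i - 1, j][0] + oplist['delete'], 'delete ' + original[i]])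
--             # insert操作
--             ops.append([m[i, j - 1][0] + oplist['insert'], 'insert ' + target[j]])
--
--             # 取分数最小的
--             m[i, j] = min(ops, key=lambda x: x[0])
--
--     score = m[i, j][0]
--     while i > 0 or j > 0:
--         op = m[i, j][1]
--         operations.insert(0, op)  # 倒序输出操作序列
--         if 'copy' in op:
--             i, j = i - 1, j - 1
--         elif 'delete' in op:
--             i = i - 1
--         elif 'insert' in op:
--             j = j - 1
--     pass
--     # 代码结束
--
--     return score, operations
-- ===== SOURCE B (Python) =====
-- def dpWordEdit(original, target, oplist):
--     # Numeric-only DP rows built left-to-right, then a backward walk over the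
--     # cost table reconstructs the operation list (copy preferred over delete
--     # over insert, matching the forward tie-breaking).
--     row = [0]
--     for _ in target:
--         row.append(row[-1] + oplist['insert'])
--     table = [row]
--     for ch in original:
--         prev = table[-1]
--         row = [prev[0] + oplist['delete']]
--         for j, tc in enumerate(target, 1):
--             best = prev[j] + oplist['delete']
--             cand = row[-1] + oplist['insert']
--             if cand < best:
--                 best = cand
--             if ch == tc:
--                 cand = prev[j - 1] + oplist['copy']
--                 if cand <= best:
--                     best = cand
--             row.append(best)
--         table.append(row)
--     i, j = len(original), len(target)
--     operations = []
--     while i > 0 or j > 0: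
--         if j == 0:
--             i -= 1
--             operations.append('delete ' + original[i])
--         elif i == 0:
--             j -= 1
--             operations.append('insert ' + target[j])
--         elif original[i - 1] == target[j - 1] and table[i][j] == table[i - 1][j - 1] + oplist['copy']:
--             i, j = i - 1, j - 1
--             operations.append('copy ' + original[i])
--         elif table[i][j] == table[i - 1][j] + oplist['delete']:
--             i -= 1
--             operations.append('delete ' + original[i])
--         else:
--             j -= 1
--             operations.append('insert ' + target[j])
--     operations.reverse()
--     return table[len(original)][len(target)], operations
-- ===== Notes on version B (the rewrite author's own statement) =====
-- stated objective: simpler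
-- what changed: A fills a dict of [cost, op-string] cells keyed by (i,j) tuples and replays the stored strings with substring tests; B fills a numeric-only cost table row by row and reconstructs the operation list by a backward walk that re-tests the candidates in A's tie order (copy, delete, insert).
import Mathlib
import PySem

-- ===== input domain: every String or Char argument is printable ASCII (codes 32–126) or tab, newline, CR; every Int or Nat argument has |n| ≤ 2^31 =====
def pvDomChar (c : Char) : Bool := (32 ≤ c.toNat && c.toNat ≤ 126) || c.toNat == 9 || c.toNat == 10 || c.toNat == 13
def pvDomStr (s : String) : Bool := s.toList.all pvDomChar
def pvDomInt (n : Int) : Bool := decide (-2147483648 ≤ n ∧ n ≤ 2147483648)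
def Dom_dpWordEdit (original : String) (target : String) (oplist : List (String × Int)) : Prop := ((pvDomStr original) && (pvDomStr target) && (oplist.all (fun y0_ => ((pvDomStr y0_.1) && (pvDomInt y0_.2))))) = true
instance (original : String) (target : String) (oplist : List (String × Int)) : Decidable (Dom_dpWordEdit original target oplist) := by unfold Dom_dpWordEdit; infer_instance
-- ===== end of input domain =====

-- B replaces A's dict of [score, op-string] cells and forward trace of stored strings by a
-- numeric-only DP table plus a backward reconstruction of the operations (objective: simpler).

-- ===== PORT A =====
-- the while-loop trace; fuel bounds the loop (each step decreases i+j by ≥ 1; under Pre_ it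
-- stops exactly at (0,0), so fuel = i+j suffices; on a cell whose op matches no keyword the
-- Python loops forever / raises TypeError on None — unreachable under Pre_)
def dpTraceA (d : PySem.Dict (Int × Int) (Int × Option String)) : Nat → Int → Int → List String → List String
  | 0, _, _, acc => acc
  | fuel+1, i, j, acc =>
    if 0 < i ∨ 0 < j then
      let op := ((d.getD (i, j) (0, none)).2).getD ""
      let acc := PySem.List.insert acc 0 op
      if PySem.Str.isIn "copy" op then dpTraceA d fuel (i-1) (j-1) acc
      else if PySem.Str.isIn "delete" op then dpTraceA d fuel (i-1) j acc
      else if PySem.Str.isIn "insert" op then dpTraceA d fuel i (j-1) acc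
      else acc
    else acc

def dpWordEdit (original : String) (target : String) (oplist : List (String × Int)) : Int × List String :=
  -- m = {(i, j): [0, None] ...}
  let m0 : PySem.Dict (Int × Int) (Int × Option String) :=
    (PySem.List.pyRange 0 (PySem.Str.len original + 1) 1).foldl (fun d i =>
      (PySem.List.pyRange 0 (PySem.Str.len target + 1) 1).foldl (fun d j =>
        d.insert (i, j) (0, none)) d) PySem.Dict.empty
  -- original, target = '-' + original, '-' + target
  let os : List Char := '-' :: original.toList
  let ts : List Char := '-' :: target.toList
  -- first column: all delete
  let m1 := (PySem.List.pyRange 1 (PySem.List.len os) 1).foldl (fun d i =>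
      d.insert (i, 0) ((List.lookup "delete" oplist).getD 0 * i,
        some ("delete " ++ (PySem.List.pyGetD os i '-').toString))) m0
  -- first row: all insert
  let m2 := (PySem.List.pyRange 1 (PySem.List.len ts) 1).foldl (fun d j =>
      d.insert (0, j) ((List.lookup "insert" oplist).getD 0 * j,
        some ("insert " ++ (PySem.List.pyGetD ts j '-').toString))) m1
  -- fill the table cell by cell
  let m3 := (PySem.List.pyRange 1 (PySem.List.len os) 1).foldl (fun d i =>
      (PySem.List.pyRange 1 (PySem.List.len ts) 1).foldl (fun d j =>
        let ops : List (Int × Option String) :=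
          (if PySem.List.pyGetD os i '-' = PySem.List.pyGetD ts j '-' then
            [((d.getD (i-1, j-1) (0, none)).1 + (List.lookup "copy" oplist).getD 0,
              some ("copy " ++ (PySem.List.pyGetD os i '-').toString))] else [])
          ++ [((d.getD (i-1, j) (0, none)).1 + (List.lookup "delete" oplist).getD 0,
              some ("delete " ++ (PySem.List.pyGetD os i '-').toString))]
          ++ [((d.getD (i, j-1) (0, none)).1 + (List.lookup "insert" oplist).getD 0,
              some ("insert " ++ (PySem.List.pyGetD ts j '-').toString))]
        d.insert (i, j) (PySem.List.minD ops (fun x => x.1) (0, none))) d) m2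
  -- the loops leave i = len(os)-1, j = len(ts)-1 (Pre_ makes both strings nonempty, so both
  -- loops ran; on an empty string Python raises UnboundLocalError — excluded by Pre_)
  let iF : Int := PySem.List.len os - 1
  let jF : Int := PySem.List.len ts - 1
  (( m3.getD (iF, jF) (0, none)).1, dpTraceA m3 (iF + jF).toNat iF jF [])

-- ===== PORT B =====
-- backward walk over the numeric table; recursion on i+j (each branch decreases it)
def dpWalkB (table : List (List Int)) (o t : List Char) (oplist : List (String × Int))
    (i j : Nat) (acc : List String) : List String :=
  if hij : i = 0 ∧ j = 0 then acc
  else if hj : j = 0 then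
    dpWalkB table o t oplist (i-1) 0 (acc ++ ["delete " ++ (o.getD (i-1) ' ').toString])
  else if hi : i = 0 then
    dpWalkB table o t oplist 0 (j-1) (acc ++ ["insert " ++ (t.getD (j-1) ' ').toString])
  else if o.getD (i-1) ' ' = t.getD (j-1) ' ' ∧
      PySem.List.pyGetD (PySem.List.pyGetD table (i : Int) []) (j : Int) 0 =
        PySem.List.pyGetD (PySem.List.pyGetD table ((i : Int) - 1) []) ((j : Int) - 1) 0 +
          (List.lookup "copy" oplist).getD 0 then
    dpWalkB table o t oplist (i-1) (j-1) (acc ++ ["copy " ++ (o.getD (i-1) ' ').toString])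
  else if PySem.List.pyGetD (PySem.List.pyGetD table (i : Int) []) (j : Int) 0 =
      PySem.List.pyGetD (PySem.List.pyGetD table ((i : Int) - 1) []) (j : Int) 0 +
        (List.lookup "delete" oplist).getD 0 then
    dpWalkB table o t oplist (i-1) j (acc ++ ["delete " ++ (o.getD (i-1) ' ').toString])
  else
    dpWalkB table o t oplist i (j-1) (acc ++ ["insert " ++ (t.getD (j-1) ' ').toString])
termination_by i + j
decreasing_by all_goals omega

def dpWordEdit_alt (original : String) (target : String) (oplist : List (String × Int)) : Int × List String :=
  -- row = [0]; for _ in target: row.append(row[-1] + oplist['insert'])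
  let row0 : List Int := target.toList.foldl (fun row _ =>
      row ++ [PySem.List.pyGetD row (-1) 0 + (List.lookup "insert" oplist).getD 0]) [0]
  -- table built row by row
  let table : List (List Int) := original.toList.foldl (fun table ch =>
      let prev := PySem.List.pyGetD table (-1) []
      let row := (PySem.List.enumerate target.toList 1).foldl (fun row p =>
          let best := PySem.List.pyGetD prev p.1 0 + (List.lookup "delete" oplist).getD 0
          let cand := PySem.List.pyGetD row (-1) 0 + (List.lookup "insert" oplist).getD 0
          let best := if cand < best then cand else best
          let best := if ch = p.2 then
              (let cand := PySem.List.pyGetD prev (p.1 - 1) 0 + (List.lookup "copy" oplist).getD 0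
               if cand ≤ best then cand else best)
            else best
          row ++ [best])
        [PySem.List.pyGetD prev 0 0 + (List.lookup "delete" oplist).getD 0]
      table ++ [row]) [row0]
  let n := original.toList.length
  let mN := target.toList.length
  let ops := (dpWalkB table original.toList target.toList oplist n mN []).reverse
  (PySem.List.pyGetD (PySem.List.pyGetD table (n : Int) []) (mN : Int) 0, ops)

-- ===== PRECONDITION & SPEC =====
-- Pre_ excludes exactly the inputs where the Python A raises: an empty original or target
-- (UnboundLocalError: the final 'm[i, j]' reads the loop variables) and an oplist missing the
-- 'delete' or 'insert' key, or missing 'copy' while the two words share a character (KeyError).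
def Pre_dpWordEdit (original : String) (target : String) (oplist : List (String × Int)) : Prop :=
  original.toList ≠ [] ∧ target.toList ≠ [] ∧
  (List.lookup "delete" oplist).isSome = true ∧ (List.lookup "insert" oplist).isSome = true ∧
  (original.toList.any (fun c => target.toList.contains c) = true →
    (List.lookup "copy" oplist).isSome = true)
instance (original : String) (target : String) (oplist : List (String × Int)) : Decidable (Pre_dpWordEdit original target oplist) := by unfold Pre_dpWordEdit; infer_instance

def pvWitness_dpWordEdit : String × String × (List (String × Int)) :=
  ("ab", "b", [("delete", 1), ("insert", 1), ("copy", 0)])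

def Spec_dpWordEdit (original : String) (target : String) (oplist : List (String × Int)) (out : Int × List String) : Prop := out = dpWordEdit_alt original target oplist
instance (original : String) (target : String) (oplist : List (String × Int)) (out : Int × List String) : Decidable (Spec_dpWordEdit original target oplist out) := by unfold Spec_dpWordEdit; infer_instance

-- ===== CLAIM (what is proved, stated in full; the proofs are below) =====
def Claim_equal_dpWordEdit : Prop := ∀ (original : String) (target : String) (oplist : List (String × Int)), Dom_dpWordEdit original target oplist → Pre_dpWordEdit original target oplist → Spec_dpWordEdit original target oplist (dpWordEdit original target oplist)

-- ===== LEMMAS AND PROOFS =====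

-- the common mathematical content: the DP cell (value, op) both programs realise
def specCell (o t : List Char) (wd wi wc : Int) : Nat → Nat → Int × Option String
  | 0, 0 => (0, none)
  | i+1, 0 => (wd * ((i : Int) + 1), some ("delete " ++ (o.getD i ' ').toString))
  | 0, j+1 => (wi * ((j : Int) + 1), some ("insert " ++ (t.getD j ' ').toString))
  | i+1, j+1 =>
    let cc := (specCell o t wd wi wc i j).1 + wc
    let dc := (specCell o t wd wi wc i (j+1)).1 + wd
    let ic := (specCell o t wd wi wc (i+1) j).1 + wi
    if o.getD i ' ' = t.getD j ' ' ∧ cc ≤ dc ∧ cc ≤ ic then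
      (cc, some ("copy " ++ (o.getD i ' ').toString))
    else if dc ≤ ic then (dc, some ("delete " ++ (o.getD i ' ').toString))
    else (ic, some ("insert " ++ (t.getD j ' ').toString))
termination_by i j => i + j

-- the common trace, accumulating ops in front while walking from (i, j) to (0, 0)
def specTrace (o t : List Char) (wd wi wc : Int) : Nat → Nat → List String → List String
  | 0, 0, acc => acc
  | i+1, 0, acc => specTrace o t wd wi wc i 0 (("delete " ++ (o.getD i ' ').toString) :: acc)
  | 0, j+1, acc => specTrace o t wd wi wc 0 j (("insert " ++ (t.getD j ' ').toString) :: acc)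
  | i+1, j+1, acc =>
    let cc := (specCell o t wd wi wc i j).1 + wc
    let dc := (specCell o t wd wi wc i (j+1)).1 + wd
    let ic := (specCell o t wd wi wc (i+1) j).1 + wi
    if o.getD i ' ' = t.getD j ' ' ∧ cc ≤ dc ∧ cc ≤ ic then
      specTrace o t wd wi wc i j (("copy " ++ (o.getD i ' ').toString) :: acc)
    else if dc ≤ ic then
      specTrace o t wd wi wc i (j+1) (("delete " ++ (o.getD i ' ').toString) :: acc)
    else specTrace o t wd wi wc (i+1) j (("insert " ++ (t.getD j ' ').toString) :: acc)
termination_by i j => i + j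





-- shorthand for the dict default / init value
def pvV0 : Int × Option String := (0, none)

-- the region of the table already filled: borders, the first I interior rows, M cells of row I+1
def partFill (o t : List Char) (wd wi wc : Int) (I M : Nat) (x y : Int) : Int × Option String :=
  if (0 ≤ x ∧ x ≤ o.length ∧ y = 0) ∨ (x = 0 ∧ 0 ≤ y ∧ y ≤ t.length)
      ∨ (1 ≤ x ∧ x ≤ I ∧ 1 ≤ y ∧ y ≤ t.length) ∨ (x = I + 1 ∧ 1 ≤ y ∧ y ≤ M)
  then specCell o t wd wi wc x.toNat y.toNat else pvV0

lemma partFill_eq_spec (o t : List Char) (wd wi wc : Int) (I M : Nat) (x y : Int)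
    (hx : 0 ≤ x) (hy : 0 ≤ y) (hxn : x ≤ o.length) (hyt : y ≤ t.length)
    (h : y = 0 ∨ x ≤ I ∨ (x = I + 1 ∧ y ≤ M)) :
    partFill o t wd wi wc I M x y = specCell o t wd wi wc x.toNat y.toNat := by
  unfold partFill; split_ifs with hc
  · rfl
  · exfalso; omega

lemma partFill_succ_row (o t : List Char) (wd wi wc : Int) (I : Nat) (x y : Int) :
    partFill o t wd wi wc I t.length x y = partFill o t wd wi wc (I + 1) 0 x y := by
  unfold partFill; split_ifs <;> first | rfl | (exfalso; omega)

lemma partFill_grow (o t : List Char) (wd wi wc : Int) (I M : Nat) (x y : Int)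
    (hne : ¬(x = (I : Int) + 1 ∧ y = (M : Int) + 1)) :
    partFill o t wd wi wc I M x y = partFill o t wd wi wc I (M + 1) x y := by
  unfold partFill; split_ifs <;> first | rfl | (exfalso; push_cast at *; omega)

lemma spec_col_fst (o t : List Char) (wd wi wc : Int) (i : Nat) :
    (specCell o t wd wi wc i 0).1 = wd * i := by
  cases i with
  | zero => simp [specCell]
  | succ k => simp [specCell]

lemma spec_row_fst (o t : List Char) (wd wi wc : Int) (j : Nat) :
    (specCell o t wd wi wc 0 j).1 = wi * j := by
  cases j with
  | zero => simp [specCell]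
  | succ k => simp [specCell]

-- Python's min(ops, key=...) (first minimal) over the candidate list is exactly the spec cell
lemma minD_cell (o t : List Char) (wd wi wc : Int) (i j : Nat) :
    PySem.List.minD
      ((if o.getD i ' ' = t.getD j ' ' then
          [((specCell o t wd wi wc i j).1 + wc, some ("copy " ++ (o.getD i ' ').toString))] else [])
        ++ [((specCell o t wd wi wc i (j+1)).1 + wd, some ("delete " ++ (o.getD i ' ').toString))]
        ++ [((specCell o t wd wi wc (i+1) j).1 + wi, some ("insert " ++ (t.getD j ' ').toString))])
      (fun x => x.1) pvV0 = specCell o t wd wi wc (i+1) (j+1) := by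
  rw [show specCell o t wd wi wc (i+1) (j+1) =
    (let cc := (specCell o t wd wi wc i j).1 + wc
     let dc := (specCell o t wd wi wc i (j+1)).1 + wd
     let ic := (specCell o t wd wi wc (i+1) j).1 + wi
     if o.getD i ' ' = t.getD j ' ' ∧ cc ≤ dc ∧ cc ≤ ic then
       (cc, some ("copy " ++ (o.getD i ' ').toString))
     else if dc ≤ ic then (dc, some ("delete " ++ (o.getD i ' ').toString))
     else (ic, some ("insert " ++ (t.getD j ' ').toString))) from by rw [specCell]]
  by_cases heq : o.getD i ' ' = t.getD j ' ' <;>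
    simp only [heq, if_true, if_false, PySem.List.minD, PySem.List.min?, List.foldl,
      List.cons_append, List.nil_append] <;>
    split_ifs <;> simp_all <;> (try omega) <;> split_ifs <;> simp_all <;> omega

-- character access through the '-'-prefixed word
lemma pyGetD_dash (o : List Char) (k : Nat) (hk : k < o.length) :
    PySem.List.pyGetD ('-' :: o) ((k : Int) + 1) '-' = o.getD k ' ' := by
  have h1 : ((k : Int) + 1) = ((k + 1 : Nat) : Int) := by push_cast; ring
  rw [h1, PySem.List.pyGetD_natCast]
  simp [List.getD, List.getElem?_cons_succ, List.getElem?_eq_getElem hk]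

-- ===== port A: the dict fill =====
lemma m0_getD (lo li : List Int) (d : PySem.Dict (Int × Int) (Int × Option String))
    (h : ∀ k, d.getD k pvV0 = pvV0) (k : Int × Int) :
    ((lo.foldl (fun d i => li.foldl (fun d j => d.insert (i, j) ((0 : Int), (none : Option String))) d) d)).getD k pvV0 = pvV0 := by
  have inner : ∀ (i : Int) (d : PySem.Dict (Int × Int) (Int × Option String)),
      (∀ k, d.getD k pvV0 = pvV0) → ∀ k,
      (li.foldl (fun d j => d.insert (i, j) ((0 : Int), (none : Option String))) d).getD k pvV0 = pvV0 := by
    induction li with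
    | nil => intro i d h k; exact h k
    | cons j li ih =>
      intro i d h k
      refine ih i _ ?_ k
      intro k'
      rw [PySem.Dict.getD_insert]
      split_ifs with hk
      · rfl
      · exact h k'
  induction lo generalizing d with
  | nil => exact h k
  | cons i lo ih => exact ih _ (inner i d h)

lemma m1_getD (o t : List Char) (wd wi wc : Int) (oplist : List (String × Int))
    (hwd : wd = (List.lookup "delete" oplist).getD 0) :
    ∀ (N : Nat), N ≤ o.length → ∀ (d : PySem.Dict (Int × Int) (Int × Option String)),
      (∀ k, d.getD k pvV0 = pvV0) → ∀ (x y : Int),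
    ((PySem.List.pyRange 1 ((N : Int) + 1) 1).foldl (fun d i =>
        d.insert (i, 0) ((List.lookup "delete" oplist).getD 0 * i,
          some ("delete " ++ (PySem.List.pyGetD ('-' :: o) i '-').toString))) d).getD (x, y) pvV0
      = if 1 ≤ x ∧ x ≤ N ∧ y = 0 then specCell o t wd wi wc x.toNat 0 else pvV0 := by
  intro N
  induction N with
  | zero =>
    intro _ d hd x y
    rw [show ((0 : Nat) : Int) + 1 = 1 by norm_num, PySem.List.pyRange_one_eq_nil (by norm_num)]
    simp only [List.foldl_nil]
    rw [hd, if_neg (by omega)]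
  | succ N ih =>
    intro hN d hd x y
    rw [show ((N + 1 : Nat) : Int) + 1 = ((N : Int) + 1) + 1 by push_cast; ring,
      PySem.List.pyRange_one_succ_right (by omega), List.foldl_append]
    simp only [List.foldl_cons, List.foldl_nil]
    rw [PySem.Dict.getD_insert]
    by_cases hk : (x, y) = (((N : Int) + 1), (0 : Int))
    · rw [if_pos hk]
      rw [Prod.mk.injEq] at hk
      rw [if_pos (by omega : 1 ≤ x ∧ x ≤ ((N + 1 : Nat) : Int) ∧ y = 0)]
      have hx1 : x.toNat = N + 1 := by omega
      rw [hx1, pyGetD_dash o N (by omega)]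
      rw [show specCell o t wd wi wc (N + 1) 0
          = (wd * ((N : Int) + 1), some ("delete " ++ (o.getD N ' ').toString)) from by rw [specCell]]
      rw [hwd]
    · rw [if_neg hk, ih (by omega) d hd x y]
      have hk' : ¬(x = (N : Int) + 1 ∧ y = 0) := by
        intro hcon; exact hk (by rw [Prod.mk.injEq]; exact hcon)
      by_cases hc : 1 ≤ x ∧ x ≤ (N : Int) ∧ y = 0
      · rw [if_pos hc, if_pos (by push_cast; omega)]
      · rw [if_neg hc, if_neg (by push_cast; omega)]

lemma m2_getD (o t : List Char) (wd wi wc : Int) (oplist : List (String × Int))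
    (hwi : wi = (List.lookup "insert" oplist).getD 0) :
    ∀ (M : Nat), M ≤ t.length → ∀ (d : PySem.Dict (Int × Int) (Int × Option String)),
      (∀ x y : Int, d.getD (x, y) pvV0 = if 1 ≤ x ∧ x ≤ o.length ∧ y = 0 then specCell o t wd wi wc x.toNat 0 else pvV0) → ∀ (x y : Int),
    ((PySem.List.pyRange 1 ((M : Int) + 1) 1).foldl (fun d j =>
        d.insert (0, j) ((List.lookup "insert" oplist).getD 0 * j,
          some ("insert " ++ (PySem.List.pyGetD ('-' :: t) j '-').toString))) d).getD (x, y) pvV0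
      = if 1 ≤ x ∧ x ≤ o.length ∧ y = 0 then specCell o t wd wi wc x.toNat 0
        else if x = 0 ∧ 1 ≤ y ∧ y ≤ M then specCell o t wd wi wc 0 y.toNat else pvV0 := by
  intro M
  induction M with
  | zero =>
    intro _ d hd x y
    rw [show ((0 : Nat) : Int) + 1 = 1 by norm_num, PySem.List.pyRange_one_eq_nil (by norm_num)]
    simp only [List.foldl_nil]
    rw [hd]
    by_cases h1 : 1 ≤ x ∧ x ≤ o.length ∧ y = 0
    · rw [if_pos h1, if_pos h1]
    · rw [if_neg h1, if_neg h1, if_neg (by omega)]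
  | succ M ih =>
    intro hM d hd x y
    rw [show ((M + 1 : Nat) : Int) + 1 = ((M : Int) + 1) + 1 by push_cast; ring,
      PySem.List.pyRange_one_succ_right (by omega), List.foldl_append]
    simp only [List.foldl_cons, List.foldl_nil]
    rw [PySem.Dict.getD_insert]
    by_cases hk : (x, y) = ((0 : Int), ((M : Int) + 1))
    · rw [if_pos hk]
      rw [Prod.mk.injEq] at hk
      rw [if_neg (by omega), if_pos (by push_cast; omega)]
      have hy1 : y.toNat = M + 1 := by omega
      rw [hy1, pyGetD_dash t M (by omega)]
      rw [show specCell o t wd wi wc 0 (M + 1)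
          = (wi * ((M : Int) + 1), some ("insert " ++ (t.getD M ' ').toString)) from by rw [specCell]]
      rw [hwi]
    · rw [if_neg hk, ih (by omega) d hd x y]
      have hk' : ¬(x = 0 ∧ y = (M : Int) + 1) := by
        intro hcon; exact hk (by rw [Prod.mk.injEq]; exact hcon)
      by_cases h1 : 1 ≤ x ∧ x ≤ o.length ∧ y = 0
      · rw [if_pos h1, if_pos h1]
      · rw [if_neg h1, if_neg h1]
        by_cases h2 : x = 0 ∧ 1 ≤ y ∧ y ≤ (M : Int)
        · rw [if_pos h2, if_pos (by push_cast; omega)]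
        · rw [if_neg h2, if_neg (by push_cast; omega)]

lemma m2_to_part (o t : List Char) (wd wi wc : Int) (x y : Int) :
    (if 1 ≤ x ∧ x ≤ o.length ∧ y = 0 then specCell o t wd wi wc x.toNat 0
     else if x = 0 ∧ 1 ≤ y ∧ y ≤ t.length then specCell o t wd wi wc 0 y.toNat else pvV0)
    = partFill o t wd wi wc 0 0 x y := by
  by_cases h1 : 1 ≤ x ∧ x ≤ (o.length : Int) ∧ y = 0
  · rw [if_pos h1]; unfold partFill; rw [if_pos (by omega)]
    have hy : y.toNat = 0 := by omega
    rw [hy]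
  · rw [if_neg h1]
    by_cases h2 : x = 0 ∧ 1 ≤ y ∧ y ≤ (t.length : Int)
    · rw [if_pos h2]; unfold partFill; rw [if_pos (by omega)]
      have hx : x.toNat = 0 := by omega
      rw [hx]
    · rw [if_neg h2]; unfold partFill
      split_ifs with h3
      · have hx : x.toNat = 0 := by omega
        have hy : y.toNat = 0 := by omega
        rw [hx, hy, show specCell o t wd wi wc 0 0 = pvV0 from by rw [specCell]; rfl]
      · rfl

-- one interior row of the fill loop
lemma fill_row (o t : List Char) (wd wi wc : Int) (oplist : List (String × Int))
    (hwd : wd = (List.lookup "delete" oplist).getD 0) (hwi : wi = (List.lookup "insert" oplist).getD 0)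
    (hwc : wc = (List.lookup "copy" oplist).getD 0) (I : Nat) (hI : I + 1 ≤ o.length) :
    ∀ (M : Nat), M ≤ t.length → ∀ (d : PySem.Dict (Int × Int) (Int × Option String)),
      (∀ x y : Int, d.getD (x, y) pvV0 = partFill o t wd wi wc I 0 x y) → ∀ (x y : Int),
    ((PySem.List.pyRange 1 ((M : Int) + 1) 1).foldl (fun d j =>
        d.insert (((I : Int) + 1), j) (PySem.List.minD
          ((if PySem.List.pyGetD ('-' :: o) ((I : Int) + 1) '-' = PySem.List.pyGetD ('-' :: t) j '-' then
              [((d.getD (((I : Int) + 1) - 1, j - 1) pvV0).1 + (List.lookup "copy" oplist).getD 0,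
                some ("copy " ++ (PySem.List.pyGetD ('-' :: o) ((I : Int) + 1) '-').toString))] else [])
            ++ [((d.getD (((I : Int) + 1) - 1, j) pvV0).1 + (List.lookup "delete" oplist).getD 0,
                some ("delete " ++ (PySem.List.pyGetD ('-' :: o) ((I : Int) + 1) '-').toString))]
            ++ [((d.getD (((I : Int) + 1), j - 1) pvV0).1 + (List.lookup "insert" oplist).getD 0,
                some ("insert " ++ (PySem.List.pyGetD ('-' :: t) j '-').toString))])
          (fun x => x.1) pvV0)) d).getD (x, y) pvV0
      = partFill o t wd wi wc I M x y := by
  intro M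
  induction M with
  | zero =>
    intro _ d hd x y
    rw [show ((0 : Nat) : Int) + 1 = 1 by norm_num, PySem.List.pyRange_one_eq_nil (by norm_num)]
    simpa only [List.foldl_nil] using hd x y
  | succ M ih =>
    intro hM d hd x y
    rw [show ((M + 1 : Nat) : Int) + 1 = ((M : Int) + 1) + 1 by push_cast; ring,
      PySem.List.pyRange_one_succ_right (by omega), List.foldl_append]
    simp only [List.foldl_cons, List.foldl_nil]
    have hIH := ih (by omega) d hd
    have e1 : ((I : Int) + 1) - 1 = (I : Int) := by ring
    have e2 : ((M : Int) + 1) - 1 = (M : Int) := by ring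
    have p1 : partFill o t wd wi wc I M ((I : Int)) ((M : Int)) = specCell o t wd wi wc I M := by
      rw [partFill_eq_spec o t wd wi wc I M _ _ (by omega) (by omega) (by omega) (by omega) (by omega)]
      simp
    have p2 : partFill o t wd wi wc I M ((I : Int)) ((M : Int) + 1) = specCell o t wd wi wc I (M + 1) := by
      rw [partFill_eq_spec o t wd wi wc I M _ _ (by omega) (by omega) (by omega) (by omega) (by omega)]
      have hy1 : ((M : Int) + 1).toNat = M + 1 := by omega
      rw [hy1]; simp
    have p3 : partFill o t wd wi wc I M ((I : Int) + 1) ((M : Int)) = specCell o t wd wi wc (I + 1) M := by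
      rw [partFill_eq_spec o t wd wi wc I M _ _ (by omega) (by omega) (by omega) (by omega) (by omega)]
      have hx1 : ((I : Int) + 1).toNat = I + 1 := by omega
      rw [hx1]; simp
    have hc1 : PySem.List.pyGetD ('-' :: o) ((I : Int) + 1) '-' = o.getD I ' ' := pyGetD_dash o I (by omega)
    have hc2 : PySem.List.pyGetD ('-' :: t) ((M : Int) + 1) '-' = t.getD M ' ' := pyGetD_dash t M (by omega)
    rw [PySem.Dict.getD_insert]
    by_cases hk : (x, y) = (((I : Int) + 1), ((M : Int) + 1))
    · rw [if_pos hk]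
      simp only [hIH]
      simp only [e1, e2, hc1, hc2, p1, p2, p3, ← hwd, ← hwi, ← hwc]
      rw [minD_cell]
      rw [Prod.mk.injEq] at hk
      rw [partFill_eq_spec o t wd wi wc I (M + 1) x y (by omega) (by omega) (by omega) (by omega)
        (by push_cast; omega)]
      have hx1 : x.toNat = I + 1 := by omega
      have hy1 : y.toNat = M + 1 := by omega
      rw [hx1, hy1]
    · rw [if_neg hk, hIH x y]
      rw [Prod.mk.injEq] at hk
      exact partFill_grow o t wd wi wc I M x y hk

-- the outer fill loop
lemma fill_tbl (o t : List Char) (wd wi wc : Int) (oplist : List (String × Int))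
    (hwd : wd = (List.lookup "delete" oplist).getD 0) (hwi : wi = (List.lookup "insert" oplist).getD 0)
    (hwc : wc = (List.lookup "copy" oplist).getD 0) :
    ∀ (I : Nat), I ≤ o.length → ∀ (d : PySem.Dict (Int × Int) (Int × Option String)),
      (∀ x y : Int, d.getD (x, y) pvV0 = partFill o t wd wi wc 0 0 x y) → ∀ (x y : Int),
    ((PySem.List.pyRange 1 ((I : Int) + 1) 1).foldl (fun d i =>
        (PySem.List.pyRange 1 ((t.length : Int) + 1) 1).foldl (fun d j =>
          d.insert (i, j) (PySem.List.minD
            ((if PySem.List.pyGetD ('-' :: o) i '-' = PySem.List.pyGetD ('-' :: t) j '-' then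
                [((d.getD (i - 1, j - 1) pvV0).1 + (List.lookup "copy" oplist).getD 0,
                  some ("copy " ++ (PySem.List.pyGetD ('-' :: o) i '-').toString))] else [])
              ++ [((d.getD (i - 1, j) pvV0).1 + (List.lookup "delete" oplist).getD 0,
                  some ("delete " ++ (PySem.List.pyGetD ('-' :: o) i '-').toString))]
              ++ [((d.getD (i, j - 1) pvV0).1 + (List.lookup "insert" oplist).getD 0,
                  some ("insert " ++ (PySem.List.pyGetD ('-' :: t) j '-').toString))])
            (fun x => x.1) pvV0)) d) d).getD (x, y) pvV0
      = partFill o t wd wi wc I 0 x y := by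
  intro I
  induction I with
  | zero =>
    intro _ d hd x y
    rw [show PySem.List.pyRange 1 (((0 : Nat) : Int) + 1) 1 = [] from
      PySem.List.pyRange_one_eq_nil (by norm_num)]
    simpa only [List.foldl_nil] using hd x y
  | succ I ih =>
    intro hI d hd x y
    rw [show ((I + 1 : Nat) : Int) + 1 = ((I : Int) + 1) + 1 by push_cast; ring,
      PySem.List.pyRange_one_succ_right (a := 1) (b := (I : Int) + 1) (by omega), List.foldl_append]
    simp only [List.foldl_cons, List.foldl_nil]
    rw [fill_row o t wd wi wc oplist hwd hwi hwc I (by omega) t.length (le_refl _) _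
      (fun x y => ih (by omega) d hd x y) x y]
    rw [partFill_succ_row]

-- ===== substring tests on the three op strings =====
lemma not_isIn_pair (sub l : List Char) (a b : Char) (ha : a ∈ sub) (hb : b ∈ sub)
    (hab : a ≠ b) (hla : a ∉ l) (hlb : b ∉ l) (ch : Char) :
    PySem.Chars.isIn sub (l ++ [ch]) = false := by
  rw [PySem.Chars.isIn_eq_false_iff]
  intro h
  have h1 := h.subset ha
  have h2 := h.subset hb
  simp only [List.mem_append, List.mem_singleton] at h1 h2
  rcases h1 with h1 | h1
  · exact hla h1
  rcases h2 with h2 | h2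
  · exact hlb h2
  exact hab (h1.trans h2.symm)

lemma isIn_copy_copy (ch : Char) : PySem.Str.isIn "copy" ("copy " ++ ch.toString) = true := by
  have h1 : ("copy " ++ ch.toString).toList = ['c','o','p','y'] ++ [' ', ch] := by simp
  have h2 : ("copy" : String).toList = ['c','o','p','y'] := by simp
  rw [PySem.Str.isIn_eq, h1, h2, PySem.Chars.isIn_iff_infix]
  exact ⟨[], [' ', ch], by simp⟩
lemma isIn_copy_delete (ch : Char) : PySem.Str.isIn "copy" ("delete " ++ ch.toString) = false := by
  have h1 : ("delete " ++ ch.toString).toList = ['d','e','l','e','t','e',' '] ++ [ch] := by simp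
  have h2 : ("copy" : String).toList = ['c','o','p','y'] := by simp
  rw [PySem.Str.isIn_eq, h1, h2]
  exact not_isIn_pair _ _ 'c' 'o' (by decide) (by decide) (by decide) (by decide) (by decide) ch
lemma isIn_copy_insert (ch : Char) : PySem.Str.isIn "copy" ("insert " ++ ch.toString) = false := by
  have h1 : ("insert " ++ ch.toString).toList = ['i','n','s','e','r','t',' '] ++ [ch] := by simp
  have h2 : ("copy" : String).toList = ['c','o','p','y'] := by simp
  rw [PySem.Str.isIn_eq, h1, h2]
  exact not_isIn_pair _ _ 'c' 'o' (by decide) (by decide) (by decide) (by decide) (by decide) ch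
lemma isIn_delete_delete (ch : Char) : PySem.Str.isIn "delete" ("delete " ++ ch.toString) = true := by
  have h1 : ("delete " ++ ch.toString).toList = ['d','e','l','e','t','e'] ++ [' ', ch] := by simp
  have h2 : ("delete" : String).toList = ['d','e','l','e','t','e'] := by simp
  rw [PySem.Str.isIn_eq, h1, h2, PySem.Chars.isIn_iff_infix]
  exact ⟨[], [' ', ch], by simp⟩
lemma isIn_delete_insert (ch : Char) : PySem.Str.isIn "delete" ("insert " ++ ch.toString) = false := by
  have h1 : ("insert " ++ ch.toString).toList = ['i','n','s','e','r','t',' '] ++ [ch] := by simp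
  have h2 : ("delete" : String).toList = ['d','e','l','e','t','e'] := by simp
  rw [PySem.Str.isIn_eq, h1, h2]
  exact not_isIn_pair _ _ 'd' 'l' (by decide) (by decide) (by decide) (by decide) (by decide) ch
lemma isIn_insert_insert (ch : Char) : PySem.Str.isIn "insert" ("insert " ++ ch.toString) = true := by
  have h1 : ("insert " ++ ch.toString).toList = ['i','n','s','e','r','t'] ++ [' ', ch] := by simp
  have h2 : ("insert" : String).toList = ['i','n','s','e','r','t'] := by simp
  rw [PySem.Str.isIn_eq, h1, h2, PySem.Chars.isIn_iff_infix]
  exact ⟨[], [' ', ch], by simp⟩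

-- ===== port A: the trace loop =====
lemma traceA_eq (o t : List Char) (wd wi wc : Int) (d : PySem.Dict (Int × Int) (Int × Option String))
    (hd : ∀ x y : Int, d.getD (x, y) pvV0 = partFill o t wd wi wc o.length 0 x y) :
    ∀ (fuel : Nat) (i j : Nat), i ≤ o.length → j ≤ t.length → i + j ≤ fuel → ∀ (acc : List String),
    dpTraceA d fuel (i : Int) (j : Int) acc = specTrace o t wd wi wc i j acc := by
  intro fuel
  induction fuel with
  | zero =>
    intro i j hi hj hf acc
    have hi0 : i = 0 := by omega
    have hj0 : j = 0 := by omega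
    subst hi0; subst hj0
    rw [specTrace]; rfl
  | succ fuel ih =>
    intro i j hi hj hf acc
    match i, j with
    | 0, 0 =>
      rw [dpTraceA, specTrace]
      simp
    | i+1, 0 =>
      have hcell : d.getD (((i + 1 : Nat) : Int), ((0 : Nat) : Int)) pvV0
          = specCell o t wd wi wc (i + 1) 0 := by
        rw [hd, partFill_eq_spec o t wd wi wc o.length 0 _ _ (by omega) (by omega) (by omega)
          (by omega) (by omega)]
        have e1 : (((i + 1 : Nat) : Int)).toNat = i + 1 := by omega
        have e2 : (((0 : Nat) : Int)).toNat = 0 := by omega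
        rw [e1, e2]
      rw [dpTraceA, if_pos (by push_cast; omega)]
      simp only [show ((0 : Int), (none : Option String)) = pvV0 from rfl]
      simp only [hcell, show specCell o t wd wi wc (i + 1) 0
          = (wd * ((i : Int) + 1), some ("delete " ++ (o.getD i ' ').toString)) from by rw [specCell]]
      simp only [Option.getD_some, isIn_copy_delete, isIn_delete_delete, if_false, if_true,
        Bool.false_eq_true, PySem.List.insert_zero]
      rw [show ((i + 1 : Nat) : Int) - 1 = ((i : Nat) : Int) by push_cast; ring]
      rw [ih i 0 (by omega) (by omega) (by omega)]
      rw [specTrace]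
    | 0, j+1 =>
      have hcell : d.getD (((0 : Nat) : Int), ((j + 1 : Nat) : Int)) pvV0
          = specCell o t wd wi wc 0 (j + 1) := by
        rw [hd, partFill_eq_spec o t wd wi wc o.length 0 _ _ (by omega) (by omega) (by omega)
          (by omega) (by omega)]
        have e1 : (((0 : Nat) : Int)).toNat = 0 := by omega
        have e2 : (((j + 1 : Nat) : Int)).toNat = j + 1 := by omega
        rw [e1, e2]
      rw [dpTraceA, if_pos (by push_cast; omega)]
      simp only [show ((0 : Int), (none : Option String)) = pvV0 from rfl]
      simp only [hcell, show specCell o t wd wi wc 0 (j + 1)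
          = (wi * ((j : Int) + 1), some ("insert " ++ (t.getD j ' ').toString)) from by rw [specCell]]
      simp only [Option.getD_some, isIn_copy_insert, isIn_delete_insert, isIn_insert_insert,
        if_false, if_true, Bool.false_eq_true, PySem.List.insert_zero]
      rw [show ((j + 1 : Nat) : Int) - 1 = ((j : Nat) : Int) by push_cast; ring]
      rw [ih 0 j (by omega) (by omega) (by omega)]
      rw [specTrace]
    | i+1, j+1 =>
      have hcell : d.getD (((i + 1 : Nat) : Int), ((j + 1 : Nat) : Int)) pvV0
          = specCell o t wd wi wc (i + 1) (j + 1) := by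
        rw [hd, partFill_eq_spec o t wd wi wc o.length 0 _ _ (by omega) (by omega) (by omega)
          (by omega) (by omega)]
        have e1 : (((i + 1 : Nat) : Int)).toNat = i + 1 := by omega
        have e2 : (((j + 1 : Nat) : Int)).toNat = j + 1 := by omega
        rw [e1, e2]
      rw [dpTraceA, if_pos (by push_cast; omega)]
      simp only [show ((0 : Int), (none : Option String)) = pvV0 from rfl]
      rw [specTrace]
      simp only [hcell, show specCell o t wd wi wc (i + 1) (j + 1)
          = (let cc := (specCell o t wd wi wc i j).1 + wc
             let dc := (specCell o t wd wi wc i (j+1)).1 + wd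
             let ic := (specCell o t wd wi wc (i+1) j).1 + wi
             if o.getD i ' ' = t.getD j ' ' ∧ cc ≤ dc ∧ cc ≤ ic then
               (cc, some ("copy " ++ (o.getD i ' ').toString))
             else if dc ≤ ic then (dc, some ("delete " ++ (o.getD i ' ').toString))
             else (ic, some ("insert " ++ (t.getD j ' ').toString))) from by rw [specCell]]
      by_cases h1 : o.getD i ' ' = t.getD j ' ' ∧
          (specCell o t wd wi wc i j).1 + wc ≤ (specCell o t wd wi wc i (j+1)).1 + wd ∧
          (specCell o t wd wi wc i j).1 + wc ≤ (specCell o t wd wi wc (i+1) j).1 + wi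
      · simp only [if_pos h1, Option.getD_some, isIn_copy_copy, if_true, PySem.List.insert_zero]
        rw [show ((i + 1 : Nat) : Int) - 1 = ((i : Nat) : Int) by push_cast; ring,
          show ((j + 1 : Nat) : Int) - 1 = ((j : Nat) : Int) by push_cast; ring]
        exact ih i j (by omega) (by omega) (by omega) _
      · by_cases h2 : (specCell o t wd wi wc i (j+1)).1 + wd ≤ (specCell o t wd wi wc (i+1) j).1 + wi
        · simp only [if_neg h1, if_pos h2, Option.getD_some, isIn_copy_delete, isIn_delete_delete,
            Bool.false_eq_true, if_false, if_true, PySem.List.insert_zero]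
          rw [show ((i + 1 : Nat) : Int) - 1 = ((i : Nat) : Int) by push_cast; ring]
          exact ih i (j+1) (by omega) (by omega) (by omega) _
        · simp only [if_neg h1, if_neg h2, Option.getD_some, isIn_copy_insert, isIn_delete_insert,
            isIn_insert_insert, Bool.false_eq_true, if_false, if_true, PySem.List.insert_zero]
          rw [show ((j + 1 : Nat) : Int) - 1 = ((j : Nat) : Int) by push_cast; ring]
          exact ih (i+1) j (by omega) (by omega) (by omega) _

-- ===== port B: the rows =====
lemma getD_map_range_int {A : Type} (f : Nat → A) (n k : Nat) (hk : k < n) (dflt : A) :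
    ((List.range n).map f).getD k dflt = f k := by
  simp [List.getD, List.getElem?_map, List.getElem?_range, hk]

lemma rowExt (wi' : Int) :
    ∀ (l : List Char) (acc : List Int) (a : Int),
    l.foldl (fun row _ => row ++ [PySem.List.pyGetD row (-1) 0 + wi']) (acc ++ [a])
      = (acc ++ [a]) ++ (List.range l.length).map (fun k : Nat => a + wi' * ((k : Int) + 1)) := by
  intro l
  induction l with
  | nil => intro acc a; simp
  | cons c l ih =>
    intro acc a
    simp only [List.foldl_cons, PySem.List.pyGetD_neg_one_append_singleton]
    rw [ih (acc ++ [a]) (a + wi')]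
    rw [List.length_cons, List.range_succ_eq_map, List.map_cons, List.map_map]
    have hfun : ((fun k : Nat => a + wi' * ((k : Int) + 1)) ∘ Nat.succ)
        = (fun k : Nat => (a + wi') + wi' * ((k : Int) + 1)) := by
      funext k; simp only [Function.comp_apply]; push_cast; ring
    rw [hfun]
    simp only [List.append_assoc, List.singleton_append, List.cons_append, Nat.cast_zero]
    norm_num

lemma spec_fst_row0 (o t : List Char) (wd wi wc : Int) (oplist : List (String × Int))
    (hwi : wi = (List.lookup "insert" oplist).getD 0) :
    t.foldl (fun row _ =>
        row ++ [PySem.List.pyGetD row (-1) 0 + (List.lookup "insert" oplist).getD 0]) [0]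
      = (List.range (t.length + 1)).map (fun j => (specCell o t wd wi wc 0 j).1) := by
  rw [show ([0] : List Int) = [] ++ [0] from rfl, rowExt]
  simp only [List.nil_append, List.singleton_append]
  rw [List.range_succ_eq_map, List.map_cons, List.map_map]
  congr 1
  · rw [spec_row_fst]; simp
  · apply List.map_congr_left
    intro k hk
    simp only [Function.comp_apply]
    rw [spec_row_fst, hwi]
    push_cast; ring

lemma inner_row_eq (o t : List Char) (wd wi wc : Int) (oplist : List (String × Int))
    (hwd : wd = (List.lookup "delete" oplist).getD 0) (hwi : wi = (List.lookup "insert" oplist).getD 0)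
    (hwc : wc = (List.lookup "copy" oplist).getD 0) (I : Nat) (hI : I < o.length)
    (prev : List Int) (hprev : prev = (List.range (t.length + 1)).map (fun j => (specCell o t wd wi wc I j).1))
    (ch : Char) (hch : ch = o.getD I ' ') :
    ∀ (l : List Char) (j0 : Nat), j0 ≤ t.length → l = t.drop j0 →
      ∀ (sIdx : Int), sIdx = (j0 : Int) + 1 →
      ∀ (acc : List Int), acc = (List.range (j0 + 1)).map (fun j => (specCell o t wd wi wc (I + 1) j).1) →
    ((PySem.List.enumerate l sIdx).foldl (fun row p =>
        row ++ [if ch = p.2 then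
            (if PySem.List.pyGetD prev (p.1 - 1) 0 + (List.lookup "copy" oplist).getD 0 ≤
                (if PySem.List.pyGetD row (-1) 0 + (List.lookup "insert" oplist).getD 0 <
                    PySem.List.pyGetD prev p.1 0 + (List.lookup "delete" oplist).getD 0 then
                  PySem.List.pyGetD row (-1) 0 + (List.lookup "insert" oplist).getD 0
                else PySem.List.pyGetD prev p.1 0 + (List.lookup "delete" oplist).getD 0) then
              PySem.List.pyGetD prev (p.1 - 1) 0 + (List.lookup "copy" oplist).getD 0
            else (if PySem.List.pyGetD row (-1) 0 + (List.lookup "insert" oplist).getD 0 <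
                    PySem.List.pyGetD prev p.1 0 + (List.lookup "delete" oplist).getD 0 then
                  PySem.List.pyGetD row (-1) 0 + (List.lookup "insert" oplist).getD 0
                else PySem.List.pyGetD prev p.1 0 + (List.lookup "delete" oplist).getD 0))
          else (if PySem.List.pyGetD row (-1) 0 + (List.lookup "insert" oplist).getD 0 <
                  PySem.List.pyGetD prev p.1 0 + (List.lookup "delete" oplist).getD 0 then
                PySem.List.pyGetD row (-1) 0 + (List.lookup "insert" oplist).getD 0
              else PySem.List.pyGetD prev p.1 0 + (List.lookup "delete" oplist).getD 0)]) acc)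
      = (List.range (t.length + 1)).map (fun j => (specCell o t wd wi wc (I + 1) j).1) := by
  intro l
  induction l with
  | nil =>
    intro j0 hj0 hl sIdx hs acc hacc
    have hj : j0 = t.length := by
      have h1 := congrArg List.length hl
      simp [List.length_drop] at h1
      omega
    subst hj
    simpa [PySem.List.enumerate] using hacc
  | cons c l ih =>
    intro j0 hj0 hl sIdx hs acc hacc
    have hj0lt : j0 < t.length := by
      have h1 := congrArg List.length hl
      simp [List.length_drop] at h1
      omega
    have hc : c = t.getD j0 ' ' := by
      have h1 : (t.drop j0)[0]? = some c := by rw [← hl]; rfl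
      rw [List.getElem?_drop, Nat.add_zero] at h1
      simp [List.getD, h1]
    have hl' : l = t.drop (j0 + 1) := by
      have h1 : t.drop (j0 + 1) = (t.drop j0).drop 1 := by
        rw [List.drop_drop, Nat.add_comm]
      rw [h1, ← hl, List.drop_one, List.tail_cons]
    rw [hs, PySem.List.enumerate_cons]
    simp only [List.foldl_cons]
    have e1 : ((j0 : Int) + 1) - 1 = (j0 : Int) := by ring
    have hprev1 : PySem.List.pyGetD prev ((j0 : Int) + 1) 0 = (specCell o t wd wi wc I (j0 + 1)).1 := by
      rw [hprev, show ((j0 : Int) + 1) = ((j0 + 1 : Nat) : Int) by push_cast; ring,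
        PySem.List.pyGetD_natCast, getD_map_range_int _ _ _ (by omega)]
    have hprev0 : PySem.List.pyGetD prev ((j0 : Int)) 0 = (specCell o t wd wi wc I j0).1 := by
      rw [hprev, PySem.List.pyGetD_natCast, getD_map_range_int _ _ _ (by omega)]
    have hrow : PySem.List.pyGetD acc (-1) 0 = (specCell o t wd wi wc (I + 1) j0).1 := by
      rw [hacc, List.range_succ, List.map_append, List.map_singleton,
        PySem.List.pyGetD_neg_one_append_singleton]
    refine ih (j0 + 1) (by omega) hl' ((j0 : Int) + 1 + 1) (by push_cast; ring) _ ?_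
    simp only [e1, hprev1, hprev0, hrow, hch, hc]
    rw [List.range_succ (n := j0 + 1), List.map_append, List.map_singleton]
    rw [← hacc]
    congr 2
    simp only [← hwd, ← hwi, ← hwc]
    rw [show specCell o t wd wi wc (I + 1) (j0 + 1) =
      (let cc := (specCell o t wd wi wc I j0).1 + wc
       let dc := (specCell o t wd wi wc I (j0+1)).1 + wd
       let ic := (specCell o t wd wi wc (I+1) j0).1 + wi
       if o.getD I ' ' = t.getD j0 ' ' ∧ cc ≤ dc ∧ cc ≤ ic then
         (cc, some ("copy " ++ (o.getD I ' ').toString))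
       else if dc ≤ ic then (dc, some ("delete " ++ (o.getD I ' ').toString))
       else (ic, some ("insert " ++ (t.getD j0 ' ').toString))) from by rw [specCell]]
    simp only [apply_ite (Prod.fst (α := Int) (β := Option String))]
    by_cases hchar : o.getD I ' ' = t.getD j0 ' '
    · simp only [hchar, eq_self_iff_true, true_and, if_true]
      split_ifs <;> omega
    · have hno : ¬(o.getD I ' ' = t.getD j0 ' ' ∧
          (specCell o t wd wi wc I j0).1 + wc ≤ (specCell o t wd wi wc I (j0 + 1)).1 + wd ∧
          (specCell o t wd wi wc I j0).1 + wc ≤ (specCell o t wd wi wc (I + 1) j0).1 + wi) :=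
        fun hcon => hchar hcon.1
      rw [if_neg hchar, if_neg hno]
      split_ifs <;> omega

lemma table_eq (o t : List Char) (wd wi wc : Int) (oplist : List (String × Int))
    (hwd : wd = (List.lookup "delete" oplist).getD 0) (hwi : wi = (List.lookup "insert" oplist).getD 0)
    (hwc : wc = (List.lookup "copy" oplist).getD 0) :
    ∀ (l : List Char) (i0 : Nat), i0 ≤ o.length → l = o.drop i0 →
      ∀ (acc : List (List Int)),
        acc = (List.range (i0 + 1)).map (fun i => (List.range (t.length + 1)).map (fun j => (specCell o t wd wi wc i j).1)) →
    (l.foldl (fun table ch =>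
        table ++ [(PySem.List.enumerate t 1).foldl (fun row p =>
          row ++ [if ch = p.2 then
              (if PySem.List.pyGetD (PySem.List.pyGetD table (-1) []) (p.1 - 1) 0 + (List.lookup "copy" oplist).getD 0 ≤
                  (if PySem.List.pyGetD row (-1) 0 + (List.lookup "insert" oplist).getD 0 <
                      PySem.List.pyGetD (PySem.List.pyGetD table (-1) []) p.1 0 + (List.lookup "delete" oplist).getD 0 then
                    PySem.List.pyGetD row (-1) 0 + (List.lookup "insert" oplist).getD 0
                  else PySem.List.pyGetD (PySem.List.pyGetD table (-1) []) p.1 0 + (List.lookup "delete" oplist).getD 0) then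
                PySem.List.pyGetD (PySem.List.pyGetD table (-1) []) (p.1 - 1) 0 + (List.lookup "copy" oplist).getD 0
              else (if PySem.List.pyGetD row (-1) 0 + (List.lookup "insert" oplist).getD 0 <
                      PySem.List.pyGetD (PySem.List.pyGetD table (-1) []) p.1 0 + (List.lookup "delete" oplist).getD 0 then
                    PySem.List.pyGetD row (-1) 0 + (List.lookup "insert" oplist).getD 0
                  else PySem.List.pyGetD (PySem.List.pyGetD table (-1) []) p.1 0 + (List.lookup "delete" oplist).getD 0))
            else (if PySem.List.pyGetD row (-1) 0 + (List.lookup "insert" oplist).getD 0 <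
                    PySem.List.pyGetD (PySem.List.pyGetD table (-1) []) p.1 0 + (List.lookup "delete" oplist).getD 0 then
                  PySem.List.pyGetD row (-1) 0 + (List.lookup "insert" oplist).getD 0
                else PySem.List.pyGetD (PySem.List.pyGetD table (-1) []) p.1 0 + (List.lookup "delete" oplist).getD 0)])
          [PySem.List.pyGetD (PySem.List.pyGetD table (-1) []) 0 0 + (List.lookup "delete" oplist).getD 0]]) acc)
      = (List.range (o.length + 1)).map (fun i => (List.range (t.length + 1)).map (fun j => (specCell o t wd wi wc i j).1)) := by
  intro l
  induction l with
  | nil =>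
    intro i0 hi0 hl acc hacc
    have hi : i0 = o.length := by
      have h1 := congrArg List.length hl
      simp [List.length_drop] at h1
      omega
    subst hi
    simpa using hacc
  | cons c l ih =>
    intro i0 hi0 hl acc hacc
    have hi0lt : i0 < o.length := by
      have h1 := congrArg List.length hl
      simp [List.length_drop] at h1
      omega
    have hc : c = o.getD i0 ' ' := by
      have h1 : (o.drop i0)[0]? = some c := by rw [← hl]; rfl
      rw [List.getElem?_drop, Nat.add_zero] at h1
      simp [List.getD, h1]
    have hl' : l = o.drop (i0 + 1) := by
      have h1 : o.drop (i0 + 1) = (o.drop i0).drop 1 := by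
        rw [List.drop_drop, Nat.add_comm]
      rw [h1, ← hl, List.drop_one, List.tail_cons]
    simp only [List.foldl_cons]
    have hprevT : PySem.List.pyGetD acc (-1) []
        = (List.range (t.length + 1)).map (fun j => (specCell o t wd wi wc i0 j).1) := by
      rw [hacc, List.range_succ (n := i0), List.map_append, List.map_singleton,
        PySem.List.pyGetD_neg_one_append_singleton]
    refine ih (i0 + 1) (by omega) hl' _ ?_
    rw [List.range_succ (n := i0 + 1), List.map_append, List.map_singleton, ← hacc]
    congr 2
    simp only [hprevT]
    have hinit : PySem.List.pyGetD
        ((List.range (t.length + 1)).map (fun j => (specCell o t wd wi wc i0 j).1)) 0 0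
          + (List.lookup "delete" oplist).getD 0 = (specCell o t wd wi wc (i0 + 1) 0).1 := by
      rw [PySem.List.pyGetD_zero, getD_map_range_int _ _ _ (by omega), spec_col_fst,
        spec_col_fst, ← hwd]
      push_cast; ring
    rw [hinit]
    exact inner_row_eq o t wd wi wc oplist hwd hwi hwc i0 hi0lt _ rfl c hc t 0 (by omega)
      (by simp) 1 (by norm_num) _ (by simp [List.range_one])

lemma specTrace_acc (o t : List Char) (wd wi wc : Int) :
    ∀ (i j : Nat) (acc : List String),
      specTrace o t wd wi wc i j acc = specTrace o t wd wi wc i j [] ++ acc := by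
  suffices H : ∀ (N i j : Nat), i + j ≤ N → ∀ (acc : List String),
      specTrace o t wd wi wc i j acc = specTrace o t wd wi wc i j [] ++ acc by
    intro i j acc; exact H (i + j) i j (le_refl _) acc
  intro N
  induction N with
  | zero =>
    intro i j hij acc
    have hi0 : i = 0 := by omega
    have hj0 : j = 0 := by omega
    subst hi0; subst hj0
    rw [specTrace, specTrace]; simp
  | succ N ih =>
    intro i j hij acc
    match i, j with
    | 0, 0 => rw [specTrace, specTrace]; simp
    | i+1, 0 =>
      rw [specTrace, specTrace, ih i 0 (by omega), ih i 0 (by omega) [_]]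
      simp
    | 0, j+1 =>
      rw [specTrace, specTrace, ih 0 j (by omega), ih 0 j (by omega) [_]]
      simp
    | i+1, j+1 =>
      rw [specTrace, specTrace]
      split_ifs with h1 h2
      · rw [ih i j (by omega), ih i j (by omega) [_]]; simp
      · rw [ih i (j+1) (by omega), ih i (j+1) (by omega) [_]]; simp
      · rw [ih (i+1) j (by omega), ih (i+1) j (by omega) [_]]; simp

lemma walkB_eq (o t : List Char) (wd wi wc : Int) (oplist : List (String × Int))
    (hwd : wd = (List.lookup "delete" oplist).getD 0) (hwi : wi = (List.lookup "insert" oplist).getD 0)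
    (hwc : wc = (List.lookup "copy" oplist).getD 0) (table : List (List Int))
    (htable : table = (List.range (o.length + 1)).map (fun i => (List.range (t.length + 1)).map (fun j => (specCell o t wd wi wc i j).1))) :
    ∀ (i j : Nat), i ≤ o.length → j ≤ t.length → ∀ (acc : List String),
      dpWalkB table o t oplist i j acc = acc ++ (specTrace o t wd wi wc i j []).reverse := by
  have hread : ∀ (a b : Nat), a ≤ o.length → b ≤ t.length →
      PySem.List.pyGetD (PySem.List.pyGetD table ((a : Nat) : Int) []) ((b : Nat) : Int) 0
        = (specCell o t wd wi wc a b).1 := by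
    intro a b ha hb
    have h1 : PySem.List.pyGetD ((List.range (o.length + 1)).map
          (fun i => (List.range (t.length + 1)).map (fun j => (specCell o t wd wi wc i j).1)))
        ((a : Nat) : Int) [] = (List.range (t.length + 1)).map (fun j => (specCell o t wd wi wc a j).1) := by
      rw [PySem.List.pyGetD_natCast, getD_map_range_int _ _ _ (by omega)]
    rw [htable, h1, PySem.List.pyGetD_natCast, getD_map_range_int _ _ _ (by omega)]
  suffices H : ∀ (N i j : Nat), i + j ≤ N → i ≤ o.length → j ≤ t.length → ∀ (acc : List String),
      dpWalkB table o t oplist i j acc = acc ++ (specTrace o t wd wi wc i j []).reverse by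
    intro i j hi hj acc; exact H (i + j) i j (le_refl _) hi hj acc
  intro N
  induction N with
  | zero =>
    intro i j hij hi hj acc
    have hi0 : i = 0 := by omega
    have hj0 : j = 0 := by omega
    subst hi0; subst hj0
    rw [dpWalkB, dif_pos ⟨rfl, rfl⟩, specTrace]
    simp
  | succ N ih =>
    intro i j hij hi hj acc
    match i, j with
    | 0, 0 =>
      rw [dpWalkB, dif_pos ⟨rfl, rfl⟩, specTrace]
      simp
    | i+1, 0 =>
      rw [dpWalkB, dif_neg (by omega), dif_pos rfl]
      simp only [Nat.add_sub_cancel]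
      rw [specTrace, specTrace_acc o t wd wi wc i 0 _,
        ih i 0 (by omega) (by omega) (by omega) _]
      simp [List.reverse_append]
    | 0, j+1 =>
      rw [dpWalkB, dif_neg (by omega), dif_neg (by omega), dif_pos rfl]
      simp only [Nat.add_sub_cancel]
      rw [specTrace, specTrace_acc o t wd wi wc 0 j _,
        ih 0 j (by omega) (by omega) (by omega) _]
      simp [List.reverse_append]
    | i+1, j+1 =>
      rw [dpWalkB, dif_neg (by omega), dif_neg (by omega), dif_neg (by omega)]
      simp only [Nat.add_sub_cancel]
      rw [show ((i + 1 : Nat) : Int) - 1 = ((i : Nat) : Int) by push_cast; ring,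
        show ((j + 1 : Nat) : Int) - 1 = ((j : Nat) : Int) by push_cast; ring]
      simp only [hread (i+1) (j+1) (by omega) (by omega), hread i j (by omega) (by omega),
        hread i (j+1) (by omega) (by omega), hread (i+1) j (by omega) (by omega),
        ← hwd, ← hwi, ← hwc]
      rw [specTrace]
      have hfst : (specCell o t wd wi wc (i+1) (j+1)).1
          = (if o.getD i ' ' = t.getD j ' ' ∧
                (specCell o t wd wi wc i j).1 + wc ≤ (specCell o t wd wi wc i (j+1)).1 + wd ∧
                (specCell o t wd wi wc i j).1 + wc ≤ (specCell o t wd wi wc (i+1) j).1 + wi then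
              (specCell o t wd wi wc i j).1 + wc
            else if (specCell o t wd wi wc i (j+1)).1 + wd ≤ (specCell o t wd wi wc (i+1) j).1 + wi then
              (specCell o t wd wi wc i (j+1)).1 + wd
            else (specCell o t wd wi wc (i+1) j).1 + wi) := by
        rw [show specCell o t wd wi wc (i + 1) (j + 1) =
          (let cc := (specCell o t wd wi wc i j).1 + wc
           let dc := (specCell o t wd wi wc i (j+1)).1 + wd
           let ic := (specCell o t wd wi wc (i+1) j).1 + wi
           if o.getD i ' ' = t.getD j ' ' ∧ cc ≤ dc ∧ cc ≤ ic then
             (cc, some ("copy " ++ (o.getD i ' ').toString))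
           else if dc ≤ ic then (dc, some ("delete " ++ (o.getD i ' ').toString))
           else (ic, some ("insert " ++ (t.getD j ' ').toString))) from by rw [specCell]]
        simp only [apply_ite (Prod.fst (α := Int) (β := Option String))]
      by_cases hch : o.getD i ' ' = t.getD j ' '
      · by_cases hcc : (specCell o t wd wi wc i j).1 + wc ≤ (specCell o t wd wi wc i (j+1)).1 + wd ∧
            (specCell o t wd wi wc i j).1 + wc ≤ (specCell o t wd wi wc (i+1) j).1 + wi
        · rw [if_pos ⟨hch, by rw [hfst, if_pos ⟨hch, hcc⟩]⟩, if_pos ⟨hch, hcc.1, hcc.2⟩]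
          rw [specTrace_acc o t wd wi wc i j _,
            ih i j (by omega) (by omega) (by omega) _]
          simp [List.reverse_append]
        · have hcell : (specCell o t wd wi wc (i+1) (j+1)).1
              = (if (specCell o t wd wi wc i (j+1)).1 + wd ≤ (specCell o t wd wi wc (i+1) j).1 + wi then
                  (specCell o t wd wi wc i (j+1)).1 + wd
                else (specCell o t wd wi wc (i+1) j).1 + wi) := by
            rw [hfst, if_neg (fun hcon => hcc ⟨hcon.2.1, hcon.2.2⟩)]
          by_cases hdi : (specCell o t wd wi wc i (j+1)).1 + wd ≤ (specCell o t wd wi wc (i+1) j).1 + wi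
          · rw [if_neg (fun hcon => by rw [hcell, if_pos hdi] at hcon; omega),
              if_pos (by rw [hcell, if_pos hdi]),
              if_neg (fun hcon => hcc ⟨hcon.2.1, hcon.2.2⟩), if_pos hdi]
            rw [specTrace_acc o t wd wi wc i (j+1) _,
              ih i (j+1) (by omega) (by omega) (by omega) _]
            simp [List.reverse_append]
          · rw [if_neg (fun hcon => by rw [hcell, if_neg hdi] at hcon; omega),
              if_neg (fun hcon => by rw [hcell, if_neg hdi] at hcon; omega),
              if_neg (fun hcon => hcc ⟨hcon.2.1, hcon.2.2⟩), if_neg hdi]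
            rw [specTrace_acc o t wd wi wc (i+1) j _,
              ih (i+1) j (by omega) (by omega) (by omega) _]
            simp [List.reverse_append]
      · have hcell : (specCell o t wd wi wc (i+1) (j+1)).1
            = (if (specCell o t wd wi wc i (j+1)).1 + wd ≤ (specCell o t wd wi wc (i+1) j).1 + wi then
                (specCell o t wd wi wc i (j+1)).1 + wd
              else (specCell o t wd wi wc (i+1) j).1 + wi) := by
          rw [hfst, if_neg (fun hcon => hch hcon.1)]
        by_cases hdi : (specCell o t wd wi wc i (j+1)).1 + wd ≤ (specCell o t wd wi wc (i+1) j).1 + wi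
        · rw [if_neg (fun hcon => hch hcon.1), if_pos (by rw [hcell, if_pos hdi]),
            if_neg (fun hcon => hch hcon.1), if_pos hdi]
          rw [specTrace_acc o t wd wi wc i (j+1) _,
            ih i (j+1) (by omega) (by omega) (by omega) _]
          simp [List.reverse_append]
        · rw [if_neg (fun hcon => hch hcon.1),
            if_neg (fun hcon => by rw [hcell, if_neg hdi] at hcon; omega),
            if_neg (fun hcon => hch hcon.1), if_neg hdi]
          rw [specTrace_acc o t wd wi wc (i+1) j _,
            ih (i+1) j (by omega) (by omega) (by omega) _]
          simp [List.reverse_append]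

-- ===== VERDICT =====
theorem dpWordEdit_spec : Claim_equal_dpWordEdit := by
  intro original target oplist hDom hPre
  unfold Spec_dpWordEdit
  simp only [dpWordEdit, dpWordEdit_alt]
  have hlo : PySem.List.len ('-' :: original.toList) = ((original.toList.length : Nat) : Int) + 1 := by
    simp [PySem.List.len_eq]
  have hlt : PySem.List.len ('-' :: target.toList) = ((target.toList.length : Nat) : Int) + 1 := by
    simp [PySem.List.len_eq]
  rw [hlo, hlt]
  rw [show ((original.toList.length : Nat) : Int) + 1 - 1 = ((original.toList.length : Nat) : Int) by ring,
    show ((target.toList.length : Nat) : Int) + 1 - 1 = ((target.toList.length : Nat) : Int) by ring]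
  simp only [show ((0 : Int), (none : Option String)) = pvV0 from rfl]
  have hm0 : ∀ k, ((PySem.List.pyRange 0 (PySem.Str.len original + 1) 1).foldl (fun d i =>
      (PySem.List.pyRange 0 (PySem.Str.len target + 1) 1).foldl (fun d j =>
        d.insert (i, j) pvV0) d) PySem.Dict.empty).getD k pvV0 = pvV0 :=
    m0_getD _ _ _ (fun k => rfl)
  have hm1 := m1_getD original.toList target.toList
    ((List.lookup "delete" oplist).getD 0) ((List.lookup "insert" oplist).getD 0)
    ((List.lookup "copy" oplist).getD 0) oplist rfl original.toList.length (le_refl _) _ hm0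
  have hm2 := m2_getD original.toList target.toList
    ((List.lookup "delete" oplist).getD 0) ((List.lookup "insert" oplist).getD 0)
    ((List.lookup "copy" oplist).getD 0) oplist rfl target.toList.length (le_refl _) _ hm1
  have hm2' : ∀ x y : Int, _ = partFill original.toList target.toList
      ((List.lookup "delete" oplist).getD 0) ((List.lookup "insert" oplist).getD 0)
      ((List.lookup "copy" oplist).getD 0) 0 0 x y :=
    fun x y => (hm2 x y).trans (m2_to_part _ _ _ _ _ x y)
  have hm3 := fill_tbl original.toList target.toList
    ((List.lookup "delete" oplist).getD 0) ((List.lookup "insert" oplist).getD 0)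
    ((List.lookup "copy" oplist).getD 0) oplist rfl rfl rfl original.toList.length (le_refl _) _ hm2'
  -- the B-side table
  have hrow0 := spec_fst_row0 original.toList target.toList
    ((List.lookup "delete" oplist).getD 0) ((List.lookup "insert" oplist).getD 0)
    ((List.lookup "copy" oplist).getD 0) oplist rfl
  have htbl := table_eq original.toList target.toList
    ((List.lookup "delete" oplist).getD 0) ((List.lookup "insert" oplist).getD 0)
    ((List.lookup "copy" oplist).getD 0) oplist rfl rfl rfl original.toList 0 (by omega)
    (by simp)
    [target.toList.foldl (fun row _ =>
      row ++ [PySem.List.pyGetD row (-1) 0 + (List.lookup "insert" oplist).getD 0]) [0]]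
    (by rw [hrow0]; simp [List.range_one])
  rw [htbl]
  have hscoreB : PySem.List.pyGetD (PySem.List.pyGetD
      ((List.range (original.toList.length + 1)).map (fun i =>
        (List.range (target.toList.length + 1)).map (fun j =>
          (specCell original.toList target.toList
            ((List.lookup "delete" oplist).getD 0) ((List.lookup "insert" oplist).getD 0)
            ((List.lookup "copy" oplist).getD 0) i j).1)))
      ((original.toList.length : Nat) : Int) []) ((target.toList.length : Nat) : Int) 0
      = (specCell original.toList target.toList
          ((List.lookup "delete" oplist).getD 0) ((List.lookup "insert" oplist).getD 0)
          ((List.lookup "copy" oplist).getD 0) original.toList.length target.toList.length).1 := by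
    rw [PySem.List.pyGetD_natCast (xs := (List.range (original.toList.length + 1)).map _),
      getD_map_range_int _ _ _ (by omega), PySem.List.pyGetD_natCast,
      getD_map_range_int _ _ _ (by omega)]
  rw [hscoreB, hm3]
  rw [partFill_eq_spec _ _ _ _ _ _ _ _ _ (by omega) (by omega) (by omega) (by omega) (by omega)]
  simp only [Int.toNat_natCast]
  rw [traceA_eq original.toList target.toList
    ((List.lookup "delete" oplist).getD 0) ((List.lookup "insert" oplist).getD 0)
    ((List.lookup "copy" oplist).getD 0) _ hm3 _
    original.toList.length target.toList.length (le_refl _) (le_refl _) (by omega) []]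
  rw [walkB_eq original.toList target.toList
    ((List.lookup "delete" oplist).getD 0) ((List.lookup "insert" oplist).getD 0)
    ((List.lookup "copy" oplist).getD 0) oplist rfl rfl rfl _ rfl
    original.toList.length target.toList.length (le_refl _) (le_refl _) []]
  simp
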